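-- pv_equiv track=rewrite | github.com/nishanthegde/bitesofpy | 225/convert_chars.py | convert_pybites_chars
-- ===== SOURCE A (Python) =====
-- PYBITES = "pybites"
--
-- def _in_pybites(c):
--     return c.lower() in PYBITES
--
-- def _swap_case(c):
--     if c.islower():
--         return c.upper()
--     else:
--         return c.lower()
--
-- def convert_pybites_chars(text):
--     """Swap case all characters in the word pybites for the given text.
--        Return the resulting string."""
--     ret = []
--     for c in text:
--         # ret.append(c)
--         if _in_pybites(c):
--             ret.append(_swap_case(c))
--         else:
--             ret.append(c)
--
--     return ''.join(ret)
-- ===== SOURCE B (Python) =====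
-- _TABLE = str.maketrans("pybitesPYBITES", "PYBITESpybites")
--
--
-- def convert_pybites_chars(text):
--     """Swap case all characters in the word pybites for the given text.
--        Return the resulting string."""
--     return text.translate(_TABLE)
-- ===== Notes on version B (the rewrite author's own statement) =====
-- stated objective: idiomatic
-- what changed: Replaces the per-character loop with its membership test and case-branching helpers by a translation table built once with str.maketrans and a single text.translate call.
import Mathlib
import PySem

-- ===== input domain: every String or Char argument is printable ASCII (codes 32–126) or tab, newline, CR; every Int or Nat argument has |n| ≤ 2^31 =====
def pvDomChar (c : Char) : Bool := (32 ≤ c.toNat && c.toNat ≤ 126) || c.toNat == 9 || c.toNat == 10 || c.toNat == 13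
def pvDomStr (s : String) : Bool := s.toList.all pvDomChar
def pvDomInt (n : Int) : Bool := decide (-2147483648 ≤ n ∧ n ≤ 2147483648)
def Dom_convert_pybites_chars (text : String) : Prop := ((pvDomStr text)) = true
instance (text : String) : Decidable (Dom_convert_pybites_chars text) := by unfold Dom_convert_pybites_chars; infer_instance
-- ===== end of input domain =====

-- B replaces A's per-character membership test and case-branch helpers by a
-- translation table built once and applied in a single pass (idiomatic str.translate).


-- ===== PORT A =====
-- PYBITES = "pybites"
def pvPYBITES : List Char := "pybites".toList

-- def _in_pybites(c): return c.lower() in PYBITES   (c is a 1-char string)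
def pv_in_pybites (c : Char) : Bool := PySem.Chars.isIn [PySem.Chars.lowerChar c] pvPYBITES

-- def _swap_case(c): if c.islower(): return c.upper() else: return c.lower()
def pv_swap_case (c : Char) : Char :=
  if PySem.Chars.islower c then PySem.Chars.upperChar c else PySem.Chars.lowerChar c

def convert_pybites_chars (text : String) : String :=
  let ret := text.toList.foldl (fun ret c =>
    if pv_in_pybites c then ret ++ [pv_swap_case c] else ret ++ [c]) []
  String.mk ret

-- ===== PORT B =====
-- _TABLE = str.maketrans("pybitesPYBITES", "PYBITESpybites")
def pvTable : PySem.Dict Char Char :=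
  PySem.Dict.ofList (List.zip "pybitesPYBITES".toList "PYBITESpybites".toList)

-- text.translate(_TABLE): each char mapped through the table, unmapped chars unchanged
def convert_pybites_chars_alt (text : String) : String :=
  String.mk (text.toList.map (fun c => pvTable.getD c c))

-- ===== PRECONDITION & SPEC =====
def Spec_convert_pybites_chars (text : String) (out : String) : Prop := out = convert_pybites_chars_alt text
instance (text : String) (out : String) : Decidable (Spec_convert_pybites_chars text out) := by unfold Spec_convert_pybites_chars; infer_instance

-- ===== CLAIM (what is proved, stated in full; the proofs are below) =====
def Claim_equal_convert_pybites_chars : Prop := ∀ (text : String), Dom_convert_pybites_chars text → Spec_convert_pybites_chars text (convert_pybites_chars text)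

-- ===== LEMMAS AND PROOFS =====

-- per-character agreement, checked for every ASCII code the domain admits
set_option maxRecDepth 8192 in
theorem pv_char_step_fin : ∀ n : Fin 127,
    (if pv_in_pybites (Char.ofNat n.val) then pv_swap_case (Char.ofNat n.val) else Char.ofNat n.val)
      = pvTable.getD (Char.ofNat n.val) (Char.ofNat n.val) := by decide

theorem pv_char_step (c : Char) (h : c.toNat ≤ 126) :
    (if pv_in_pybites c then pv_swap_case c else c) = pvTable.getD c c := by
  have := pv_char_step_fin ⟨c.toNat, by omega⟩
  simpa [Char.ofNat_toNat] using this

-- ===== VERDICT (by name: the statement is the Claim_ definition above) =====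
theorem convert_pybites_chars_spec : Claim_equal_convert_pybites_chars := by
  intro text hdom
  unfold Spec_convert_pybites_chars convert_pybites_chars convert_pybites_chars_alt
  simp only []
  have hmem : ∀ c ∈ text.toList, c.toNat ≤ 126 := by
    intro c hc
    have := List.all_eq_true.mp hdom c hc
    simp [pvDomChar] at this
    omega
  have h1 : text.toList.foldl
      (fun ret c => if pv_in_pybites c then ret ++ [pv_swap_case c] else ret ++ [c]) []
      = text.toList.foldl
      (fun ret c => ret ++ [if pv_in_pybites c then pv_swap_case c else c]) [] := by
    apply PySem.List.foldl_congr_mem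
    intro acc c hc
    split <;> rfl
  rw [h1, PySem.List.foldl_append_singleton_eq_map]
  congr 1
  apply List.map_congr_left
  intro c hc
  exact pv_char_step c (hmem c hc)
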